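-- pv_equiv track=rewrite | github.com/AbdulMo007/Leetcode-Submissions | Program to print reciprocal of letters - copy - GFG/program-to-print-reciprocal-of-letters-copy.py | reciprocalString
-- ===== SOURCE A (Python) =====
-- def reciprocalString(S):
--        n=''
--        for i in S:
--           if ord(i)>=97 and ord(i)<=122:
--             value=ord(i)-97
--             temp=122-value
--             n+=chr(temp)
--           elif ord(i)>=65 and ord(i)<=90:
--              value=ord(i)-65 # = 8
--              temp=90-value
--              n+=chr(temp)
--           else:
--                n+=i
--        return n
-- ===== SOURCE B (Python) =====
-- def reciprocalString(S):
--     table = {}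
--     for o in range(97, 123):
--         table[o] = chr(219 - o)
--     for o in range(65, 91):
--         table[o] = chr(155 - o)
--     return S.translate(table)
-- ===== Notes on version B (the rewrite author's own statement) =====
-- stated objective: faster
-- what changed: Replaces the per-character if/elif branching loop that builds the result by string concatenation with a precomputed ord->chr translation table (219-ord for lowercase, 155-ord for uppercase) applied in one str.translate call (C-level, no per-char Python bytecode), absent characters passing through unchanged.
import Mathlib
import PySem

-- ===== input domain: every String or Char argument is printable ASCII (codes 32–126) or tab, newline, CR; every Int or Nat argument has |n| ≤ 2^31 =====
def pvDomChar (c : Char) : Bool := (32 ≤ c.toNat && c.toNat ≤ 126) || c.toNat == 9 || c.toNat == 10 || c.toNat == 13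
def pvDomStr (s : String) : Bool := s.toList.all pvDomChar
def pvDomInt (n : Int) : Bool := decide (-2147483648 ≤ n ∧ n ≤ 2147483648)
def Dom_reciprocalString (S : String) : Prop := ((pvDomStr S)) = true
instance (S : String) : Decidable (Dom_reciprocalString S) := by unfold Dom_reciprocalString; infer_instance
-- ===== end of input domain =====

-- B builds a translation table once and applies it with one str.translate call (more idiomatic); A branches per character.
-- ===== PORT A =====
def reciprocalString (S : String) : String :=
  String.mk (S.toList.foldl (fun n i =>
    if 97 ≤ i.toNat ∧ i.toNat ≤ 122 then n ++ [Char.ofNat (122 - (i.toNat - 97))]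
    else if 65 ≤ i.toNat ∧ i.toNat ≤ 90 then n ++ [Char.ofNat (90 - (i.toNat - 65))]
    else n ++ [i]) [])

-- ===== PORT B =====
-- translation table: ord of each lowercase letter ↦ chr(219-ord), each uppercase ↦ chr(155-ord)
def pvTable : PySem.Dict Int Char :=
  let t := (PySem.List.pyRange 97 123 1).foldl
    (fun d o => d.insert o (Char.ofNat (219 - o).toNat)) PySem.Dict.empty
  (PySem.List.pyRange 65 91 1).foldl
    (fun d o => d.insert o (Char.ofNat (155 - o).toNat)) t

-- S.translate(table): look each char's ord up in the table, absent chars pass through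
def reciprocalString_alt (S : String) : String :=
  String.mk (S.toList.map (fun c => pvTable.getD ((c.toNat : Int)) c))

-- ===== PRECONDITION & SPEC =====
def Spec_reciprocalString (S : String) (out : String) : Prop := out = reciprocalString_alt S
instance (S : String) (out : String) : Decidable (Spec_reciprocalString S out) := by unfold Spec_reciprocalString; infer_instance

-- ===== CLAIM (what is proved, stated in full; the proofs are below) =====
def Claim_equal_reciprocalString : Prop := ∀ (S : String), Dom_reciprocalString S → Spec_reciprocalString S (reciprocalString S)

-- ===== LEMMAS AND PROOFS =====

set_option maxRecDepth 8000 in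
lemma pvTable_get?_key : ∀ n : Nat, n ≤ 126 →
    (if 97 ≤ n ∧ n ≤ 122 then some (Char.ofNat (122 - (n - 97)))
     else if 65 ≤ n ∧ n ≤ 90 then some (Char.ofNat (90 - (n - 65)))
     else none) = pvTable.get? (n : Int) := by decide

lemma pvChar_step (c : Char) (h : pvDomChar c = true) :
    (if 97 ≤ c.toNat ∧ c.toNat ≤ 122 then Char.ofNat (122 - (c.toNat - 97))
     else if 65 ≤ c.toNat ∧ c.toNat ≤ 90 then Char.ofNat (90 - (c.toNat - 65))
     else c) = pvTable.getD ((c.toNat : Int)) c := by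
  have hn : c.toNat ≤ 126 := by
    simp only [pvDomChar, Bool.or_eq_true, Bool.and_eq_true, decide_eq_true_eq, beq_iff_eq] at h
    omega
  rw [PySem.Dict.getD_eq_get?_getD, ← pvTable_get?_key c.toNat hn]
  split_ifs <;> rfl

lemma pvFoldl_snoc (l acc : List Char) :
    l.foldl (fun n i =>
      if 97 ≤ i.toNat ∧ i.toNat ≤ 122 then n ++ [Char.ofNat (122 - (i.toNat - 97))]
      else if 65 ≤ i.toNat ∧ i.toNat ≤ 90 then n ++ [Char.ofNat (90 - (i.toNat - 65))]
      else n ++ [i]) acc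
    = acc ++ l.map (fun i =>
      if 97 ≤ i.toNat ∧ i.toNat ≤ 122 then Char.ofNat (122 - (i.toNat - 97))
      else if 65 ≤ i.toNat ∧ i.toNat ≤ 90 then Char.ofNat (90 - (i.toNat - 65))
      else i) := by
  induction l generalizing acc with
  | nil => simp
  | cons c t ih => simp only [List.foldl_cons, List.map_cons]; rw [ih]; split_ifs <;> simp

-- ===== VERDICT (by name: the statement is the Claim_ definition above) =====
set_option maxRecDepth 8000 in
theorem reciprocalString_spec : Claim_equal_reciprocalString := by
  intro S hDom
  unfold Spec_reciprocalString reciprocalString reciprocalString_alt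
  rw [pvFoldl_snoc, List.nil_append]
  congr 1
  apply List.map_congr_left
  intro c hc
  have : pvDomChar c = true := by
    have := hDom
    simp only [Dom_reciprocalString, pvDomStr, List.all_eq_true] at this
    exact this c hc
  exact pvChar_step c this
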